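-- pv_equiv track=rewrite | github.com/pypi-data/pypi-mirror-352 | packages/graphai-client/graphai_client-1.16.0.tar.gz/graphai_client-1.16.0/graphai_client/client.py | get_video_information_from_streams
-- ===== SOURCE A (Python) =====
-- def get_video_information_from_streams(streams):
--     video_information = {}
--     try:
--         audio_stream_idx_largest_bitrate = max({
--             idx: stream['bit_rate']
--             for idx, stream in enumerate(streams) if stream['codec_type'] == 'audio'
--         })
--         audio_stream = streams[audio_stream_idx_largest_bitrate]
--         video_information['audio_bit_rate'] = audio_stream['bit_rate']
--         video_information['audio_codec_name'] = audio_stream['codec_name']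
--         video_information['audio_duration'] = audio_stream['duration']
--         video_information['audio_sample_rate'] = audio_stream['sample_rate']
--     except ValueError:
--         video_information['audio_bit_rate'] = None
--         video_information['audio_codec_name'] = None
--         video_information['audio_duration'] = None
--         video_information['audio_sample_rate'] = None
--     try:
--         video_stream_idx_largest_bitrate = max({
--             idx: stream['bit_rate']
--             for idx, stream in enumerate(streams) if stream['codec_type'] == 'video'
--         })
--         video_stream = streams[video_stream_idx_largest_bitrate]
--         video_information['video_bit_rate'] = video_stream['bit_rate']
--         video_information['video_codec_name'] = video_stream['codec_name']
--         video_information['video_duration'] = video_stream['duration']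
--         video_information['video_resolution'] = video_stream['resolution']
--     except ValueError:
--         video_information['video_bit_rate'] = None
--         video_information['video_codec_name'] = None
--         video_information['video_duration'] = None
--         video_information['video_resolution'] = None
--     return video_information
-- ===== SOURCE B (Python) =====
-- def get_video_information_from_streams(streams):
--     # One backward scan with early exit: the highest-index stream per codec type
--     # is simply the first match seen from the end.
--     audio = None
--     video = None
--     for stream in reversed(streams):
--         if audio is None and stream['codec_type'] == 'audio':
--             audio = stream
--         if video is None and stream['codec_type'] == 'video':
--             video = stream
--         if audio is not None and video is not None:
--             break
--     info = {}
--     if audio is not None: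
--         info['audio_bit_rate'] = audio['bit_rate']
--         info['audio_codec_name'] = audio['codec_name']
--         info['audio_duration'] = audio['duration']
--         info['audio_sample_rate'] = audio['sample_rate']
--     else:
--         info['audio_bit_rate'] = None
--         info['audio_codec_name'] = None
--         info['audio_duration'] = None
--         info['audio_sample_rate'] = None
--     if video is not None:
--         info['video_bit_rate'] = video['bit_rate']
--         info['video_codec_name'] = video['codec_name']
--         info['video_duration'] = video['duration']
--         info['video_resolution'] = video['resolution']
--     else:
--         info['video_bit_rate'] = None
--         info['video_codec_name'] = None
--         info['video_duration'] = None
--         info['video_resolution'] = None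
--     return info
-- ===== Notes on version B (the rewrite author's own statement) =====
-- stated objective: alternative
-- what changed: Replaces A's two dict-comprehension passes with max() over keys and try/except ValueError by a single backward scan with early exit: the highest-index stream per codec type is the first match seen from the end, then the eight fields are filled from the two found streams (or None).
import Mathlib
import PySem

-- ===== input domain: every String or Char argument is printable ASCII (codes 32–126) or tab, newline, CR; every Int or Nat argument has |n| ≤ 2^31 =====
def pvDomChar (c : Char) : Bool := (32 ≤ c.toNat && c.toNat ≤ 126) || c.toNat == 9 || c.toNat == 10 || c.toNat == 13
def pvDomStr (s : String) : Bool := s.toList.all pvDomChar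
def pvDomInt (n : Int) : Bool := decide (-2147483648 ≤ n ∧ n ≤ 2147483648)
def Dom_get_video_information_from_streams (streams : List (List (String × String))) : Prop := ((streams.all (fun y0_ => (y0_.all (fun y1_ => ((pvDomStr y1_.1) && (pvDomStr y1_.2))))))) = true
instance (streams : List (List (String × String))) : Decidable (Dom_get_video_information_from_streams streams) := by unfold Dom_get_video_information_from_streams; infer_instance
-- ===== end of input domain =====

-- B replaces A's two dict-comprehension + max() + try/except passes by one backward scan with
-- early exit (the highest-index stream per codec type is the first match seen from the end);
-- objective: alternative decomposition (no measured speed claim).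

-- stream['k'] : dict lookup (streams' dicts are association lists here; first match)
def pvGet (s : List (String × String)) (k : String) : Option String := (PySem.Dict.mk s).get? k

-- ===== PORT A =====
-- the dict comprehension {idx: stream['bit_rate'] for idx, stream in enumerate(streams) if stream['codec_type'] == t}
def pvBitrateDict (t : String) (streams : List (List (String × String))) : PySem.Dict Int (Option String) :=
  (PySem.List.enumerate streams).foldl
    (fun d p => if pvGet p.2 "codec_type" == some t then d.insert p.1 (pvGet p.2 "bit_rate") else d)
    PySem.Dict.empty

def get_video_information_from_streams (streams : List (List (String × String))) : List (String × Option String) :=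
  let vi0 : PySem.Dict String (Option String) := PySem.Dict.empty
  -- try: max({idx: bit_rate ...}) — max over a dict is the max of its keys; ValueError ↔ empty dict
  let vi1 : PySem.Dict String (Option String) :=
    match PySem.List.max? (pvBitrateDict "audio" streams).keys (fun y => y) with
    | some idx =>
        let audio_stream := (PySem.List.pyGet? streams idx).getD []   -- streams[idx]; idx always in range
        ((((vi0.insert "audio_bit_rate" (pvGet audio_stream "bit_rate")).insert
            "audio_codec_name" (pvGet audio_stream "codec_name")).insert
            "audio_duration" (pvGet audio_stream "duration")).insert
            "audio_sample_rate" (pvGet audio_stream "sample_rate"))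
    | none =>
        ((((vi0.insert "audio_bit_rate" none).insert "audio_codec_name" none).insert
            "audio_duration" none).insert "audio_sample_rate" none)
  let vi2 : PySem.Dict String (Option String) :=
    match PySem.List.max? (pvBitrateDict "video" streams).keys (fun y => y) with
    | some idx =>
        let video_stream := (PySem.List.pyGet? streams idx).getD []
        ((((vi1.insert "video_bit_rate" (pvGet video_stream "bit_rate")).insert
            "video_codec_name" (pvGet video_stream "codec_name")).insert
            "video_duration" (pvGet video_stream "duration")).insert
            "video_resolution" (pvGet video_stream "resolution"))
    | none =>
        ((((vi1.insert "video_bit_rate" none).insert "video_codec_name" none).insert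
            "video_duration" none).insert "video_resolution" none)
  vi2.items

-- ===== PORT B =====
-- the backward loop of Source B: first audio / first video match over reversed(streams), early break
def pvScanB : List (List (String × String)) → Option (List (String × String)) → Option (List (String × String)) →
    Option (List (String × String)) × Option (List (String × String))
  | [], a, v => (a, v)
  | s :: rest, a, v =>
      let a' := if a.isNone && (pvGet s "codec_type" == some "audio") then some s else a
      let v' := if v.isNone && (pvGet s "codec_type" == some "video") then some s else v
      if a'.isSome && v'.isSome then (a', v') else pvScanB rest a' v'

def get_video_information_from_streams_alt (streams : List (List (String × String))) : List (String × Option String) :=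
  let (audio, video) := pvScanB streams.reverse none none
  -- Source B fills a fresh dict with 8 distinct new keys in order: that is literally this list
  (match audio with
   | some s => [("audio_bit_rate", pvGet s "bit_rate"), ("audio_codec_name", pvGet s "codec_name"),
                ("audio_duration", pvGet s "duration"), ("audio_sample_rate", pvGet s "sample_rate")]
   | none => [("audio_bit_rate", none), ("audio_codec_name", none),
              ("audio_duration", none), ("audio_sample_rate", none)]) ++
  (match video with
   | some s => [("video_bit_rate", pvGet s "bit_rate"), ("video_codec_name", pvGet s "codec_name"),
                ("video_duration", pvGet s "duration"), ("video_resolution", pvGet s "resolution")]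
   | none => [("video_bit_rate", none), ("video_codec_name", none),
              ("video_duration", none), ("video_resolution", none)])

-- ===== PRECONDITION & SPEC =====
-- the last (= highest-index) stream whose 'codec_type' is t
def pvLast (t : String) (streams : List (List (String × String))) : Option (List (String × String)) :=
  (streams.filter (fun s => pvGet s "codec_type" == some t)).getLast?

-- Pre_ excludes exactly the inputs where Python A raises KeyError (uncaught: only ValueError is
-- caught): a stream without 'codec_type', an audio/video stream without 'bit_rate', or a selected
-- stream missing one of the three further fields read from it.
def Pre_get_video_information_from_streams (streams : List (List (String × String))) : Prop :=
  (∀ s ∈ streams, (pvGet s "codec_type").isSome = true ∧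
      ((pvGet s "codec_type" = some "audio" ∨ pvGet s "codec_type" = some "video") →
        (pvGet s "bit_rate").isSome = true)) ∧
  ((pvLast "audio" streams).all (fun s =>
      (pvGet s "codec_name").isSome && (pvGet s "duration").isSome && (pvGet s "sample_rate").isSome) = true) ∧
  ((pvLast "video" streams).all (fun s =>
      (pvGet s "codec_name").isSome && (pvGet s "duration").isSome && (pvGet s "resolution").isSome) = true)

instance (streams : List (List (String × String))) : Decidable (Pre_get_video_information_from_streams streams) := by
  unfold Pre_get_video_information_from_streams; infer_instance

def pvWitness_get_video_information_from_streams : (List (List (String × String))) :=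
  [[("codec_type", "audio"), ("bit_rate", "128"), ("codec_name", "aac"), ("duration", "10"), ("sample_rate", "44100")],
   [("codec_type", "video"), ("bit_rate", "900"), ("codec_name", "h264"), ("duration", "10"), ("resolution", "640x480")]]

def Spec_get_video_information_from_streams (streams : List (List (String × String))) (out : List (String × Option String)) : Prop := out = get_video_information_from_streams_alt streams
instance (streams : List (List (String × String))) (out : List (String × Option String)) : Decidable (Spec_get_video_information_from_streams streams out) := by unfold Spec_get_video_information_from_streams; infer_instance

-- ===== CLAIM (what is proved, stated in full; the proofs are below) =====
def Claim_equal_get_video_information_from_streams : Prop := ∀ (streams : List (List (String × String))), Dom_get_video_information_from_streams streams → Pre_get_video_information_from_streams streams → Spec_get_video_information_from_streams streams (get_video_information_from_streams streams)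

-- ===== LEMMAS AND PROOFS =====

-- the common rendering both ports reach
def pvRender (a v : Option (List (String × String))) : List (String × Option String) :=
  (match a with
   | some s => [("audio_bit_rate", pvGet s "bit_rate"), ("audio_codec_name", pvGet s "codec_name"),
                ("audio_duration", pvGet s "duration"), ("audio_sample_rate", pvGet s "sample_rate")]
   | none => [("audio_bit_rate", none), ("audio_codec_name", none),
              ("audio_duration", none), ("audio_sample_rate", none)]) ++
  (match v with
   | some s => [("video_bit_rate", pvGet s "bit_rate"), ("video_codec_name", pvGet s "codec_name"),
                ("video_duration", pvGet s "duration"), ("video_resolution", pvGet s "resolution")]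
   | none => [("video_bit_rate", none), ("video_codec_name", none),
              ("video_duration", none), ("video_resolution", none)])

theorem pvKeys_bitrateDict (t : String) (streams : List (List (String × String))) :
    (pvBitrateDict t streams).keys =
      ((PySem.List.enumerate streams).filter (fun p => pvGet p.2 "codec_type" == some t)).map (·.1) := by
  unfold pvBitrateDict
  rw [PySem.List.foldl_if_eq_foldl_filter]
  have hnd : (((PySem.List.enumerate streams).filter (fun p => pvGet p.2 "codec_type" == some t)).map (·.1)).Nodup := by
    apply List.Pairwise.map (R := fun p q : Int × List (String × String) => p.1 < q.1) _ (fun _ _ h => ne_of_lt h)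
    exact (PySem.List.pairwise_lt_enumerate streams 0).filter _
  have h := PySem.Dict.items_foldl_insert_fresh
      ((PySem.List.enumerate streams).filter (fun p => pvGet p.2 "codec_type" == some t))
      (fun p => p.1) (fun p => pvGet p.2 "bit_rate") PySem.Dict.empty
      (by intro a _; simp) hnd
  simp only [PySem.Dict.keys, h]
  simp [PySem.Dict.empty, Function.comp_def]

theorem pvMax_aux (t : List Int) : ∀ x, (x :: t).Pairwise (· < ·) → t.foldl max x = (x :: t).getLast (by simp) := by
  induction t with
  | nil => intro x _; simp
  | cons y t ih =>
    intro x h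
    have hxy : x < y := (List.pairwise_cons.1 h).1 y (by simp)
    have ht : (y :: t).Pairwise (· < ·) := (List.pairwise_cons.1 h).2
    have : x ⊔ y = y := sup_eq_right.2 hxy.le
    simp only [List.foldl_cons, this]
    rw [ih y ht]
    simp [List.getLast_cons]

theorem pvMax_increasing (l : List Int) (h : l.Pairwise (· < ·)) :
    PySem.List.max? l (fun y => y) = l.getLast? := by
  cases l with
  | nil => rfl
  | cons x t =>
    rw [PySem.List.max?_id_cons, pvMax_aux t x h]
    exact (List.getLast?_eq_some_getLast (by simp)).symm

theorem pvSel_eq (t : String) (streams : List (List (String × String))) :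
    (match PySem.List.max? (pvBitrateDict t streams).keys (fun y => y) with
     | some idx => some ((PySem.List.pyGet? streams idx).getD [])
     | none => none) = pvLast t streams := by
  have hpwE : ((PySem.List.enumerate streams).filter (fun p => pvGet p.2 "codec_type" == some t)).Pairwise
      (fun p q => p.1 < q.1) := (PySem.List.pairwise_lt_enumerate streams 0).filter _
  have hmax : PySem.List.max? (pvBitrateDict t streams).keys (fun y => y) =
      (((PySem.List.enumerate streams).filter (fun p => pvGet p.2 "codec_type" == some t)).getLast?).map (·.1) := by
    rw [pvKeys_bitrateDict, ← List.getLast?_map]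
    exact pvMax_increasing _ (hpwE.map _ (fun _ _ h => h))
  have hlast : pvLast t streams =
      (((PySem.List.enumerate streams).filter (fun p => pvGet p.2 "codec_type" == some t)).getLast?).map (·.2) := by
    unfold pvLast
    rw [← List.getLast?_map,
        show (fun p : Int × List (String × String) => pvGet p.2 "codec_type" == some t) =
          ((fun s => pvGet s "codec_type" == some t) ∘ (fun p : Int × List (String × String) => p.2)) from rfl,
        ← List.filter_map, PySem.List.map_snd_enumerate]
  cases hEl : ((PySem.List.enumerate streams).filter (fun p => pvGet p.2 "codec_type" == some t)).getLast? with
  | none => simp [hmax, hlast, hEl]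
  | some pr =>
    have hmem : pr ∈ PySem.List.enumerate streams 0 := List.mem_of_mem_filter (List.mem_of_getLast? hEl)
    obtain ⟨k, hk, hpr⟩ := (PySem.List.mem_enumerate_iff streams 0 pr).1 hmem
    have hget : PySem.List.pyGet? streams pr.1 = some pr.2 := by
      subst hpr
      simp [PySem.List.pyGet?_natCast, List.getElem?_eq_getElem hk]
    simp [hmax, hlast, hEl, hget]

theorem pvPortA_eq (streams : List (List (String × String))) :
    get_video_information_from_streams streams = pvRender (pvLast "audio" streams) (pvLast "video" streams) := by
  rw [← pvSel_eq "audio" streams, ← pvSel_eq "video" streams]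
  unfold get_video_information_from_streams
  cases PySem.List.max? (pvBitrateDict "audio" streams).keys (fun y => y) <;>
    cases PySem.List.max? (pvBitrateDict "video" streams).keys (fun y => y) <;>
    rfl

theorem pvScanB_eq (l : List (List (String × String))) (a v : Option (List (String × String))) :
    pvScanB l a v =
      ((if a.isSome then a else l.find? (fun s => pvGet s "codec_type" == some "audio")),
       (if v.isSome then v else l.find? (fun s => pvGet s "codec_type" == some "video"))) := by
  induction l generalizing a v with
  | nil => cases a <;> cases v <;> simp [pvScanB]
  | cons s rest ih =>
    simp only [pvScanB]
    cases a <;> cases v <;>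
      by_cases ha : (pvGet s "codec_type" == some "audio") = true <;>
      by_cases hv : (pvGet s "codec_type" == some "video") = true <;>
      simp [ha, hv, ih]

theorem pvPortB_eq (streams : List (List (String × String))) :
    get_video_information_from_streams_alt streams = pvRender (pvLast "audio" streams) (pvLast "video" streams) := by
  unfold get_video_information_from_streams_alt
  rw [pvScanB_eq]
  have ha : pvLast "audio" streams = streams.reverse.find? (fun s => pvGet s "codec_type" == some "audio") :=
    List.getLast?_filter
  have hv : pvLast "video" streams = streams.reverse.find? (fun s => pvGet s "codec_type" == some "video") :=
    List.getLast?_filter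
  rw [ha, hv]
  simp [pvRender]

-- ===== VERDICT (by name: the statement is the Claim_ definition above) =====
theorem get_video_information_from_streams_spec : Claim_equal_get_video_information_from_streams := by
  intro streams _ _
  unfold Spec_get_video_information_from_streams
  rw [pvPortA_eq, pvPortB_eq]
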